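-- pv_equiv track=rewrite | github.com/ccdxc/sw | iota/test/iris/testcases/security/policy-gen-app.py | generate_ip_list
-- ===== SOURCE A (Python) =====
-- def get_ip_addr(a, b, c, d):
--     return str(a) + "." + str(b) + "." + str(c) + "." + str(d) + "/24"
--
-- def generate_ip_list(count, cur_ip, EP):
--     gen_count = 0
--     ip_list = []
--     a = 1
--     b = 0
--     c = 0
--     d = 2
--     i = 1
--
--     while gen_count < count and i < len(EP) :
--         if EP[i] != cur_ip and EP[i] != "any":
--             ip_list.append(EP[i])
--             gen_count = gen_count + 1
--         i = i + 1
--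
--     while(gen_count < count):
--         ip_list.append(get_ip_addr(a, b, c, d))
--         d = d + 1
--         if d == 128:
--             d = 2
--             c = c + 1
--             if c == 128:
--                 c = 0
--                 b = b + 1
--                 if b == 128:
--                     b = 0
--                     a = a + 1
--
--         gen_count = gen_count + 1
--
--     return ip_list
-- ===== SOURCE B (Python) =====
-- def get_ip_addr(a, b, c, d):
--     return str(a) + "." + str(b) + "." + str(c) + "." + str(d) + "/24"
--
-- def generate_ip_list(count, cur_ip, EP):
--     # take the first `count` endpoints after EP[0] that are neither cur_ip nor "any"
--     ip_list = [ep for ep in EP[1:] if ep != cur_ip and ep != "any"][:max(count, 0)]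
--     needed = count - len(ip_list)
--     for k in range(needed):
--         d = 2 + k % 126
--         c = (k // 126) % 128
--         b = (k // 16128) % 128
--         a = 1 + k // 2064384
--         ip_list.append(get_ip_addr(a, b, c, d))
--     return ip_list
-- ===== Notes on version B (the rewrite author's own statement) =====
-- stated objective: idiomatic
-- what changed: The stateful carry-counter loop over four digit variables (a,b,c,d with nested wrap-around ifs) is replaced by a filter-and-truncate comprehension for the EP scan plus a closed-form mixed-radix formula computing each generated address directly from its index k.
import Mathlib
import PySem

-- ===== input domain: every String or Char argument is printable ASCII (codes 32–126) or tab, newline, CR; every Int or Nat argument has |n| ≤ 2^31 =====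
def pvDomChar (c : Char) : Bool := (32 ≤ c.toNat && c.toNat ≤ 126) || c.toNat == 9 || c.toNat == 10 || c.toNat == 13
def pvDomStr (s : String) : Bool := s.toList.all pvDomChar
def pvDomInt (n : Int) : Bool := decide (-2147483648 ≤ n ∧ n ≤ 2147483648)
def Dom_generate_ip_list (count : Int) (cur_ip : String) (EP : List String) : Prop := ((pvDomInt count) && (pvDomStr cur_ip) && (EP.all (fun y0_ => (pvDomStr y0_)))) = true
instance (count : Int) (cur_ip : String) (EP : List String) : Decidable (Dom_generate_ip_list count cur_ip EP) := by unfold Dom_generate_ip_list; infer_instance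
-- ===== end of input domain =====

-- B replaces A's stateful four-digit carry counter by a filter/truncate of EP plus a
-- closed-form mixed-radix index-to-address formula (objective: idiomatic; same cost).

-- ===== PORT A =====
def get_ip_addr (a b c d : Int) : String :=
  PySem.Int.toStr a ++ "." ++ PySem.Int.toStr b ++ "." ++ PySem.Int.toStr c ++ "." ++ PySem.Int.toStr d ++ "/24"

-- first while loop: scan the remaining endpoints EP[i], i = 1.. (rest = EP.drop 1)
def pvA_loop1 (count : Int) (cur_ip : String) : List String → Int → List String → Int × List String
  | [], g, acc => (g, acc)
  | ep :: rest, g, acc =>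
    if g < count then
      if ep != cur_ip && ep != "any" then
        pvA_loop1 count cur_ip rest (g + 1) (acc ++ [ep])
      else
        pvA_loop1 count cur_ip rest g acc
    else (g, acc)

-- second while loop: generate addresses with the carry counters a b c d
def pvA_loop2 (count g a b c d : Int) (acc : List String) : List String :=
  if _h : g < count then
    let acc' := acc ++ [get_ip_addr a b c d]
    let d' := d + 1
    if d' = 128 then
      let c' := c + 1
      if c' = 128 then
        let b' := b + 1
        if b' = 128 then
          pvA_loop2 count (g + 1) (a + 1) 0 0 2 acc'
        else
          pvA_loop2 count (g + 1) a b' 0 2 acc'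
      else
        pvA_loop2 count (g + 1) a b c' 2 acc'
    else
      pvA_loop2 count (g + 1) a b c d' acc'
  else acc
termination_by (count - g).toNat
decreasing_by all_goals omega

def generate_ip_list (count : Int) (cur_ip : String) (EP : List String) : List String :=
  let r := pvA_loop1 count cur_ip (EP.drop 1) 0 []
  pvA_loop2 count r.1 1 0 0 2 r.2

-- ===== PORT B =====
def generate_ip_list_alt (count : Int) (cur_ip : String) (EP : List String) : List String :=
  let ip0 := ((EP.drop 1).filter (fun ep => ep != cur_ip && ep != "any")).take (max count 0).toNat
  let needed : Int := count - (ip0.length : Int)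
  (PySem.List.pyRange 0 needed 1).foldl (fun acc k =>
    let d := 2 + PySem.Int.mod k 126
    let c := PySem.Int.mod (PySem.Int.floordiv k 126) 128
    let b := PySem.Int.mod (PySem.Int.floordiv k 16128) 128
    let a := 1 + PySem.Int.floordiv k 2064384
    acc ++ [get_ip_addr a b c d]) ip0

-- ===== PRECONDITION & SPEC =====
def Spec_generate_ip_list (count : Int) (cur_ip : String) (EP : List String) (out : List String) : Prop := out = generate_ip_list_alt count cur_ip EP
instance (count : Int) (cur_ip : String) (EP : List String) (out : List String) : Decidable (Spec_generate_ip_list count cur_ip EP out) := by unfold Spec_generate_ip_list; infer_instance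

-- ===== CLAIM (what is proved, stated in full; the proofs are below) =====
def Claim_equal_generate_ip_list : Prop := ∀ (count : Int) (cur_ip : String) (EP : List String), Dom_generate_ip_list count cur_ip EP → Spec_generate_ip_list count cur_ip EP (generate_ip_list count cur_ip EP)

-- ===== LEMMAS AND PROOFS =====

-- the closed-form address at generation index k (ediv/emod form, used by the proofs)
def pvAddr (k : Int) : String :=
  get_ip_addr (1 + k / 2064384) ((k / 16128) % 128) ((k / 126) % 128) (2 + k % 126)

-- loop1 collects the first (count - g) matching endpoints
theorem pvA_loop1_eq (count : Int) (cur_ip : String) (l : List String) :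
    ∀ (g : Int) (acc : List String),
      pvA_loop1 count cur_ip l g acc =
        (g + (((l.filter (fun ep => ep != cur_ip && ep != "any")).take (count - g).toNat).length : Int),
         acc ++ (l.filter (fun ep => ep != cur_ip && ep != "any")).take (count - g).toNat) := by
  induction l with
  | nil => intro g acc; simp [pvA_loop1]
  | cons ep rest ih =>
    intro g acc
    by_cases hg : g < count
    · by_cases hp : (ep != cur_ip && ep != "any") = true
      · have ht : (count - g).toNat = (count - (g + 1)).toNat + 1 := by omega
        simp only [pvA_loop1, if_pos hg, hp, if_true, List.filter_cons, ht,
          List.take_succ_cons, ih, Prod.mk.injEq, List.length_cons, List.append_assoc,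
          List.singleton_append]
        exact ⟨by push_cast; ring, trivial⟩
      · simp only [pvA_loop1, if_pos hg, hp, List.filter_cons, ih]
        simp
    · have ht : (count - g).toNat = 0 := by omega
      simp [pvA_loop1, if_neg hg, List.filter_cons, ht]

-- loop2 from the digit state of index k produces the closed-form addresses k, k+1, …
theorem pvA_loop2_eq (count : Int) :
    ∀ (n : Nat) (g k : Int) (acc : List String), (count - g).toNat = n → 0 ≤ k →
      pvA_loop2 count g (1 + k / 2064384) ((k / 16128) % 128) ((k / 126) % 128) (2 + k % 126) acc =
        acc ++ (PySem.List.pyRange k (k + (count - g)) 1).map pvAddr := by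
  intro n
  induction n with
  | zero =>
    intro g k acc hn hk
    have hg : ¬ g < count := by omega
    rw [pvA_loop2, dif_neg hg, PySem.List.pyRange_one_eq_nil (by omega)]
    simp
  | succ n ih =>
    intro g k acc hn hk
    have hg : g < count := by omega
    have hrange : PySem.List.pyRange k (k + (count - g)) 1 =
        k :: PySem.List.pyRange (k + 1) (k + (count - g)) 1 :=
      PySem.List.pyRange_one_cons (by omega)
    have hend : k + (count - g) = (k + 1) + (count - (g + 1)) := by ring
    have H := ih (g + 1) (k + 1)
      (acc ++ [get_ip_addr (1 + k / 2064384) ((k / 16128) % 128) ((k / 126) % 128) (2 + k % 126)])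
      (by omega) (by omega)
    rw [pvA_loop2, dif_pos hg]
    by_cases h1 : 2 + k % 126 + 1 = 128
    · by_cases h2 : (k / 126) % 128 + 1 = 128
      · by_cases h3 : (k / 16128) % 128 + 1 = 128
        · -- b, c, d all wrap, a increments
          rw [show (1 : Int) + (k + 1) / 2064384 = 1 + k / 2064384 + 1 from by omega,
            show ((k + 1) / 16128) % 128 = 0 from by omega,
            show ((k + 1) / 126) % 128 = 0 from by omega,
            show 2 + (k + 1) % 126 = 2 from by omega] at H
          simp only [h1, if_true, h2, h3]
          rw [H, hrange, hend]
          simp [pvAddr]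
        · -- c, d wrap, b increments
          rw [show (1 : Int) + (k + 1) / 2064384 = 1 + k / 2064384 from by omega,
            show ((k + 1) / 16128) % 128 = (k / 16128) % 128 + 1 from by omega,
            show ((k + 1) / 126) % 128 = 0 from by omega,
            show 2 + (k + 1) % 126 = 2 from by omega] at H
          simp only [h1, if_true, h2, if_neg h3]
          rw [H, hrange, hend]
          simp [pvAddr]
      · -- only d wraps, c increments
        rw [show (1 : Int) + (k + 1) / 2064384 = 1 + k / 2064384 from by omega,
          show ((k + 1) / 16128) % 128 = (k / 16128) % 128 from by omega,
          show ((k + 1) / 126) % 128 = (k / 126) % 128 + 1 from by omega,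
          show 2 + (k + 1) % 126 = 2 from by omega] at H
        simp only [h1, if_true, if_neg h2]
        rw [H, hrange, hend]
        simp [pvAddr]
    · -- no wrap, d increments
      rw [show (1 : Int) + (k + 1) / 2064384 = 1 + k / 2064384 from by omega,
        show ((k + 1) / 16128) % 128 = (k / 16128) % 128 from by omega,
        show ((k + 1) / 126) % 128 = (k / 126) % 128 from by omega,
        show 2 + (k + 1) % 126 = 2 + k % 126 + 1 from by omega] at H
      simp only [if_neg h1]
      rw [H, hrange, hend]
      simp [pvAddr]

-- B's fold appends the closed-form addresses 0, 1, …, needed-1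
theorem pvB_fold_eq (needed : Int) (init : List String) :
    (PySem.List.pyRange 0 needed 1).foldl (fun acc k =>
        let d := 2 + PySem.Int.mod k 126
        let c := PySem.Int.mod (PySem.Int.floordiv k 126) 128
        let b := PySem.Int.mod (PySem.Int.floordiv k 16128) 128
        let a := 1 + PySem.Int.floordiv k 2064384
        acc ++ [get_ip_addr a b c d]) init =
      init ++ (PySem.List.pyRange 0 needed 1).map pvAddr := by
  rw [PySem.List.foldl_append_singleton_eq_map]
  congr 1
  apply List.map_congr_left
  intro k hk
  have hk0 : 0 ≤ k := (PySem.List.mem_pyRange_one.mp hk).1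
  simp only [pvAddr, PySem.Int.floordiv_eq_ediv_of_pos (by norm_num : (0:Int) < 126),
    PySem.Int.floordiv_eq_ediv_of_pos (by norm_num : (0:Int) < 16128),
    PySem.Int.floordiv_eq_ediv_of_pos (by norm_num : (0:Int) < 2064384),
    PySem.Int.mod_eq_emod_of_pos (by norm_num : (0:Int) < 126),
    PySem.Int.mod_eq_emod_of_pos (by norm_num : (0:Int) < 128)]

-- ===== VERDICT (by name: the statement is the Claim_ definition above) =====
theorem generate_ip_list_spec : Claim_equal_generate_ip_list := by
  intro count cur_ip EP _
  unfold Spec_generate_ip_list generate_ip_list generate_ip_list_alt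
  rw [pvA_loop1_eq, pvB_fold_eq]
  have htake : (max count 0).toNat = (count - 0).toNat := by omega
  rw [htake]
  set t := ((EP.drop 1).filter (fun ep => ep != cur_ip && ep != "any")).take (count - 0).toNat
    with ht
  have h2 := pvA_loop2_eq count (count - (0 + (t.length : Int))).toNat (0 + (t.length : Int)) 0 t
    rfl (by norm_num)
  simp only [Int.zero_ediv, Int.zero_emod, add_zero, zero_add, List.nil_append] at h2 ⊢
  rw [h2]
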